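-- pv_equiv track=rewrite | github.com/HubertFraczek/boikwd-labolatoria | lab4/zad2.py | genA
-- ===== SOURCE A (Python) =====
-- def genA(n, k):
--     A = []
--     for i in range(n-k):
--         row = []
--         for j in range(n-k):
--             if i == j:
--                 row.append(n-1)
--             else:
--                 row.append(-1)
--         A.append(row)
--     return A
-- ===== SOURCE B (Python) =====
-- def genA(n, k):
--     m = n - k
--     if m <= 0:
--         return []
--     row = [n - 1] + [-1] * (m - 1)
--     A = [row]
--     for _ in range(m - 1):
--         row = [row[-1]] + row[:-1]
--         A.append(row)
--     return A
-- ===== Notes on version B (the rewrite author's own statement) =====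
-- stated objective: alternative
-- what changed: B constructs only the first row explicitly and derives every subsequent row by rotating the previous row right by one position, instead of deciding i==j for each of the m^2 entries.
import Mathlib
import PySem

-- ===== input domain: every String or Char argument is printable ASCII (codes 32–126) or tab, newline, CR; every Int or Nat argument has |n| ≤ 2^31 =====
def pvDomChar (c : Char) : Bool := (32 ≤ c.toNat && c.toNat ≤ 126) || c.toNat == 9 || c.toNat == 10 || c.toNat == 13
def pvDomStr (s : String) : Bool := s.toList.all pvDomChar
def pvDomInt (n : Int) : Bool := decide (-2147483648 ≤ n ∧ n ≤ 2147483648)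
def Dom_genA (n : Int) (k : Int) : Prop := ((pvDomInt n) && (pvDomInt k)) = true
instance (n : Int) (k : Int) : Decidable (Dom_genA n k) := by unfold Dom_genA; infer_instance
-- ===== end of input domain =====

-- B builds only the first row and produces each later row by rotating the previous row
-- right by one, instead of A's per-element i==j branch (objective: alternative).

-- ===== PORT A =====
-- nested loop, appending one entry at a time, branching on i == j
def genA (n : Int) (k : Int) : List (List Int) :=
  (PySem.List.pyRange 0 (n - k) 1).foldl
    (fun A i =>
      A ++ [(PySem.List.pyRange 0 (n - k) 1).foldl
              (fun row j => row ++ [if i = j then n - 1 else -1]) []])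
    []

-- ===== PORT B =====
-- the loop body: row = [row[-1]] + row[:-1]; A.append(row)   (row is always nonempty here,
-- so getLastD's default is never used; row[:-1] on a nonempty list is dropLast)
def genARotLoop : Nat → List Int → List (List Int) → List (List Int)
  | 0, _, A => A
  | c + 1, row, A =>
      let row' := row.getLastD 0 :: row.dropLast
      genARotLoop c row' (A ++ [row'])

def genA_alt (n : Int) (k : Int) : List (List Int) :=
  let m := n - k
  if m ≤ 0 then []
  else
    let row := (n - 1) :: List.replicate (m - 1).toNat (-1)
    genARotLoop (m - 1).toNat row [row]

-- ===== PRECONDITION & SPEC =====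
def Spec_genA (n : Int) (k : Int) (out : List (List Int)) : Prop := out = genA_alt n k
instance (n : Int) (k : Int) (out : List (List Int)) : Decidable (Spec_genA n k out) := by unfold Spec_genA; infer_instance

-- ===== CLAIM (what is proved, stated in full; the proofs are below) =====
def Claim_equal_genA : Prop := ∀ (n : Int) (k : Int), Dom_genA n k → Spec_genA n k (genA n k)

-- ===== LEMMAS AND PROOFS =====

-- the i-th row of the intended matrix
def rowI (n : Int) (m i : Nat) : List Int :=
  List.replicate i (-1) ++ (n - 1) :: List.replicate (m - 1 - i) (-1)

-- append-fold is a map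
theorem foldl_append_singleton {α β : Type} (f : α → β) :
    ∀ (l : List α) (init : List β),
      l.foldl (fun acc x => acc ++ [f x]) init = init ++ l.map f := by
  intro l
  induction l with
  | nil => simp
  | cons x xs ih => intro init; simp only [List.foldl_cons, List.map_cons, ih]; simp

-- A's result is a map of maps over range (n-k).toNat
theorem genA_eq_map (n k : Int) :
    genA n k = (List.range (n - k).toNat).map (fun (i : Nat) =>
      (List.range (n - k).toNat).map (fun (j : Nat) =>
        if (i : Int) = (j : Int) then n - 1 else -1)) := by
  unfold genA
  rw [PySem.List.pyRange_zero, foldl_append_singleton, List.nil_append, List.map_map]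
  refine List.map_congr_left ?_
  intro i _
  rw [Function.comp_apply, foldl_append_singleton, List.nil_append, List.map_map]
  rfl

-- rotating row i right by one gives row i+1 (while i+1 < m)
theorem rot_rowI (n : Int) (m i : Nat) (h : i + 1 < m) :
    (rowI n m i).getLastD 0 :: (rowI n m i).dropLast = rowI n m (i + 1) := by
  have hk : m - 1 - i = (m - 1 - (i + 1)) + 1 := by omega
  unfold rowI
  rw [hk, List.replicate_succ']
  rw [show List.replicate i (-1 : Int) ++ (n - 1) ::
        (List.replicate (m - 1 - (i + 1)) (-1) ++ [(-1 : Int)]) =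
      (List.replicate i (-1) ++ (n - 1) :: List.replicate (m - 1 - (i + 1)) (-1)) ++ [(-1 : Int)]
    by simp]
  rw [List.getLastD_concat, List.dropLast_concat]
  simp [List.replicate_succ]

-- the rotation loop, characterised
theorem genARotLoop_eq (n : Int) (m : Nat) :
    ∀ (c i : Nat) (A : List (List Int)), i + c + 1 = m →
      genARotLoop c (rowI n m i) A = A ++ (List.range' (i + 1) c).map (rowI n m) := by
  intro c
  induction c with
  | zero => intro i A _; simp [genARotLoop]
  | succ c ih =>
    intro i A h
    have hrot := rot_rowI n m i (by omega)
    simp only [genARotLoop, hrot]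
    rw [ih (i + 1) _ (by omega), List.range'_succ]
    simp

-- row i of the intended matrix is A's i-th row (for i < m)
theorem rowI_eq_map (n : Int) (m i : Nat) (h : i < m) :
    rowI n m i = (List.range m).map (fun (j : Nat) =>
      if (i : Int) = (j : Int) then n - 1 else -1) := by
  apply List.ext_getElem
  · simp [rowI]; omega
  · intro p h1 h2
    simp only [List.getElem_map, List.getElem_range]
    unfold rowI
    rcases lt_trichotomy p i with hpi | hpi | hpi
    · rw [List.getElem_append_left (by simpa using hpi), List.getElem_replicate]
      have : ¬ ((i : Int) = (p : Int)) := by exact_mod_cast Nat.ne_of_gt hpi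
      simp [this]
    · subst hpi
      rw [List.getElem_append_right (by simp)]
      simp
    · rw [List.getElem_append_right (by simp; omega)]
      have hne : ¬ ((i : Int) = (p : Int)) := by exact_mod_cast Nat.ne_of_lt hpi
      simp only [List.length_replicate]
      rw [List.getElem_cons]
      have hd : ¬ (p - i = 0) := by omega
      simp only [hd, List.getElem_replicate, hne]
      simp

-- B's result is the same map of maps
theorem genA_alt_eq_map (n k : Int) :
    genA_alt n k = (List.range (n - k).toNat).map (fun (i : Nat) =>
      (List.range (n - k).toNat).map (fun (j : Nat) =>
        if (i : Int) = (j : Int) then n - 1 else -1)) := by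
  unfold genA_alt
  by_cases hm : n - k ≤ 0
  · rw [if_pos hm]
    have : (n - k).toNat = 0 := Int.toNat_of_nonpos hm
    simp [this]
  · rw [if_neg hm]
    have hM : 1 ≤ (n - k).toNat := by omega
    have h1 : (n - k - 1).toNat = (n - k).toNat - 1 := by omega
    have hrow0 : (n - 1) :: List.replicate ((n - k).toNat - 1) (-1 : Int)
        = rowI n ((n - k).toNat) 0 := by
      simp [rowI]
    rw [h1]
    simp only [hrow0]
    rw [genARotLoop_eq n ((n - k).toNat) ((n - k).toNat - 1) 0 _ (by omega)]
    have hr : List.range (n - k).toNat = 0 :: List.range' 1 ((n - k).toNat - 1) := by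
      rw [List.range_eq_range', show (n - k).toNat = ((n - k).toNat - 1) + 1 by omega,
          List.range'_succ]
      simp
    rw [hr]
    simp only [List.map_cons, List.singleton_append, List.cons.injEq]
    constructor
    · rw [rowI_eq_map n _ 0 (by omega), hr]; simp
    · refine List.map_congr_left ?_
      intro i hi
      have : i < (n - k).toNat := by
        have := List.mem_range'_1.mp hi; omega
      rw [rowI_eq_map n _ i this, hr]; simp

-- ===== VERDICT (by name: the statement is the Claim_ definition above) =====
theorem genA_spec : Claim_equal_genA := by
  intro n k _
  unfold Spec_genA
  rw [genA_eq_map, genA_alt_eq_map]
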